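-- pv_equiv track=rewrite | github.com/contrario/nous | nous_lsp.py | _word_at
-- ===== SOURCE A (Python) =====
-- def _word_at(line: str, col: int) -> str:
--     if col > len(line):
--         col = len(line)
--     left = col
--     while left > 0 and (line[left - 1].isalnum() or line[left - 1] in "_-"):
--         left -= 1
--     right = col
--     while right < len(line) and (line[right].isalnum() or line[right] in "_-"):
--         right += 1
--     return line[left:right]
-- ===== SOURCE B (Python) =====
-- def _word_at(line: str, col: int) -> str:
--     # One forward pass: scan maximal runs of word characters from the left and
--     # return the first run [i, j] (inclusive bounds) that contains the clamped cursor.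
--     col = min(col, len(line))
--     n = len(line)
--     i = 0
--     while i < n:
--         c = line[i]
--         if not (c.isalnum() or c in "_-"):
--             i += 1
--             continue
--         j = i
--         while j < n and (line[j].isalnum() or line[j] in "_-"):
--             j += 1
--         if i <= col <= j:
--             return line[i:j]
--         i = j
--     return ""
-- ===== Notes on version B (the rewrite author's own statement) =====
-- stated objective: alternative
-- what changed: Replaces the expand-left/expand-right scan around the cursor with a single left-to-right tokenizer that walks maximal word-character runs and returns the first run whose inclusive span [i, j] contains the clamped cursor column. Pre_ restricts to the natural domain 0 <= col (a cursor column): for negative col A either raises IndexError or returns a value produced by Python negative-index wraparound, while B returns '' there.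
-- outside the precondition, e.g. on _word_at('abc', -1): A returns 'c', B returns ''; on _word_at('a', -2): A raises IndexError, B returns ''
-- crash fix: For col < -len(line), A raises IndexError (negative indexing in its right-expansion loop) while B returns ''. — e.g. on _word_at("a", -2): A raises IndexError, B returns ""
import Mathlib
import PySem

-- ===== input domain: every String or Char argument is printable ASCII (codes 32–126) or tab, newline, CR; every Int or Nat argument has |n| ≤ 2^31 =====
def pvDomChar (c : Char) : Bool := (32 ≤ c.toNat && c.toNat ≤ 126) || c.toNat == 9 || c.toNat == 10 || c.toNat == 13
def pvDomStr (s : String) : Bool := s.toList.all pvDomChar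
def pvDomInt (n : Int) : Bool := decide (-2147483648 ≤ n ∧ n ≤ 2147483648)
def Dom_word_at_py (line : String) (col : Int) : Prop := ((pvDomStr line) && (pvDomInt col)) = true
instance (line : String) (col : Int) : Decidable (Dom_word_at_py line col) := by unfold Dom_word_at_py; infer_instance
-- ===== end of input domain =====

-- B replaces A's expand-left/right scan around the cursor with a left-to-right tokenizer
-- over maximal word-character runs (alternative decomposition, same cost); return values only.


-- word character predicate: c.isalnum() or c in "_-"
def pvIsW (c : Char) : Bool := PySem.Chars.isalnum c || c == '_' || c == '-'

-- ===== PORT A =====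
-- while left > 0 and (line[left-1].isalnum() or line[left-1] in "_-"): left -= 1
def pvALeft (cs : List Char) : Nat → Int → Int
  | 0, l => l
  | f + 1, l =>
    if 0 < l ∧ ((PySem.List.pyGet? cs (l - 1)).any pvIsW) then pvALeft cs f (l - 1) else l

-- while right < len(line) and (line[right].isalnum() or line[right] in "_-"): right += 1
def pvARight (cs : List Char) (n : Int) : Nat → Int → Int
  | 0, r => r
  | f + 1, r =>
    if r < n ∧ ((PySem.List.pyGet? cs r).any pvIsW) then pvARight cs n f (r + 1) else r

def word_at_py (line : String) (col : Int) : String :=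
  let cs := line.toList
  let n : Int := cs.length
  let col1 := if col > n then n else col
  let left := pvALeft cs col1.toNat col1
  let right := pvARight cs n (n - col1).toNat col1
  String.mk (PySem.List.slice cs (some left) (some right))

-- ===== PORT B =====
-- outer while-loop over i: skip a non-word char, or take the maximal word run
-- starting at i (the inner while-loop = takeWhile) and test i <= col <= j.
-- fuel = number of characters left to scan (the while loop advances ≥ 1 per step);
-- fuel is always cs.length at the top-level call, so the 0-fuel branch is unreachable
def pvBGo (fuel : Nat) (col : Int) (cs : List Char) (i : Nat) : String :=
  match fuel, cs with
  | _, [] => ""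
  | 0, _ :: _ => ""
  | f + 1, c :: t =>
    if pvIsW c = false then pvBGo f col t (i + 1)
    else
      let w := List.takeWhile pvIsW (c :: t)
      if (i : Int) ≤ col ∧ col ≤ ((i + w.length : Nat) : Int) then String.mk w
      else pvBGo f col (List.drop w.length (c :: t)) (i + w.length)

def word_at_py_alt (line : String) (col : Int) : String :=
  let cs := line.toList
  let n : Int := cs.length
  pvBGo cs.length (min col n) cs 0

-- ===== PRECONDITION & SPEC =====
-- Pre_ restricts to the natural domain 0 ≤ col (a cursor column): for negative col A
-- either raises IndexError (col < -len(line)) or returns a value produced by Python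
-- negative-index wraparound, while B returns "" there.
def Pre_word_at_py (line : String) (col : Int) : Prop := 0 ≤ col
instance (line : String) (col : Int) : Decidable (Pre_word_at_py line col) := by unfold Pre_word_at_py; infer_instance

def pvWitness_word_at_py : String × Int := ("foo bar", 4)

-- For col < -len(line), A raises IndexError (negative indexing in its right-expansion
-- loop) while B returns "".
def Raises_word_at_py (line : String) (col : Int) : Prop :=
  col < -(line.toList.length : Int)
instance (line : String) (col : Int) : Decidable (Raises_word_at_py line col) := by unfold Raises_word_at_py; infer_instance

def pvRaiseWitness_word_at_py : String × Int := ("a", -2)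
def pvRaiseWitnessOut_word_at_py : String := ""

def Spec_word_at_py (line : String) (col : Int) (out : String) : Prop := out = word_at_py_alt line col
instance (line : String) (col : Int) (out : String) : Decidable (Spec_word_at_py line col out) := by unfold Spec_word_at_py; infer_instance

-- ===== CLAIM (what is proved, stated in full; the proofs are below) =====
def Claim_equal_word_at_py : Prop := ∀ (line : String) (col : Int), Dom_word_at_py line col → Pre_word_at_py line col → Spec_word_at_py line col (word_at_py line col)

def Claim_raises_word_at_py : Prop := (∀ (line : String) (col : Int), Dom_word_at_py line col → Raises_word_at_py line col → ¬ Pre_word_at_py line col) ∧ (Dom_word_at_py (pvRaiseWitness_word_at_py.1) (pvRaiseWitness_word_at_py.2) ∧ Raises_word_at_py (pvRaiseWitness_word_at_py.1) (pvRaiseWitness_word_at_py.2) ∧ word_at_py_alt (pvRaiseWitness_word_at_py.1) (pvRaiseWitness_word_at_py.2) = pvRaiseWitnessOut_word_at_py)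

-- ===== LEMMAS AND PROOFS =====

-- trailing word-run length of line[:k], leading word-run length of line[k:]
def pvT (cs : List Char) (k : Nat) : Nat := (((cs.take k).reverse).takeWhile pvIsW).length
def pvH (cs : List Char) (k : Nat) : Nat := ((cs.drop k).takeWhile pvIsW).length
-- the word around position k, as both programs should compute it
def pvW (cs : List Char) (k : Nat) : String :=
  String.mk ((cs.drop (k - pvT cs k)).take (pvT cs k + pvH cs k))

lemma pvT_le (cs : List Char) (k : Nat) : pvT cs k ≤ k := by
  have h1 := List.IsPrefix.length_le (List.takeWhile_prefix (p := pvIsW) (l := (cs.take k).reverse))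
  simp only [List.length_reverse, List.length_take] at h1
  unfold pvT
  omega

lemma pvALeft_spec (cs : List Char) : ∀ k : Nat, k ≤ cs.length →
    pvALeft cs k (k : Int) = ((k - pvT cs k : Nat) : Int) := by
  intro k
  induction k with
  | zero => intro _; simp [pvALeft, pvT]
  | succ k ih =>
    intro hk
    have hklt : k < cs.length := by omega
    have hget : PySem.List.pyGet? cs (((k : Nat) + 1 : Nat) - 1 : Int) = some cs[k] := by
      have : (((k : Nat) + 1 : Nat) - 1 : Int) = ((k : Nat) : Int) := by push_cast; ring
      rw [this, PySem.List.pyGet?_natCast, List.getElem?_eq_getElem hklt]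
    have htake : cs.take (k + 1) = cs.take k ++ [cs[k]] := by
      rw [List.take_succ, List.getElem?_eq_getElem hklt]; rfl
    by_cases hw : pvIsW cs[k] = true
    · have ht : pvT cs (k + 1) = pvT cs k + 1 := by
        unfold pvT
        rw [htake, List.reverse_append]
        simp only [List.reverse_cons, List.reverse_nil, List.nil_append, List.singleton_append,
          List.takeWhile_cons, hw, if_true, List.length_cons]
      have hT := pvT_le cs k
      have hstep : pvALeft cs (k + 1) (((k + 1 : Nat)) : Int) = pvALeft cs k (k : Int) := by
        rw [pvALeft]
        rw [if_pos ?hc]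
        case hc =>
          refine ⟨by push_cast; omega, ?_⟩
          rw [show (((k + 1 : Nat) : Int) - 1) = ((k : Nat) : Int) by push_cast; ring,
            PySem.List.pyGet?_natCast, List.getElem?_eq_getElem hklt, Option.any_some, hw]
        congr 1
        push_cast; ring
      rw [hstep, ih (by omega), ht]
      push_cast; omega
    · have ht : pvT cs (k + 1) = 0 := by
        unfold pvT
        rw [htake, List.reverse_append]
        simp only [List.reverse_cons, List.reverse_nil, List.nil_append, List.singleton_append,
          List.takeWhile_cons, hw, if_false, Bool.false_eq_true, List.length_nil]
      rw [pvALeft]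
      rw [if_neg ?hc, ht]
      case hc =>
        intro hcond
        rw [show (((k + 1 : Nat) : Int) - 1) = ((k : Nat) : Int) by push_cast; ring,
          PySem.List.pyGet?_natCast, List.getElem?_eq_getElem hklt, Option.any_some] at hcond
        exact hw hcond.2
      push_cast; ring
-- (leading-run characterisation of A's right loop)
lemma pvARight_spec (cs : List Char) : ∀ f k : Nat, k + f = cs.length →
    pvARight cs (cs.length : Int) f (k : Int) = ((k + pvH cs k : Nat) : Int) := by
  intro f
  induction f with
  | zero =>
    intro k hk
    have : pvH cs k = 0 := by
      simp [pvH, List.drop_eq_nil_of_le (by omega : cs.length ≤ k)]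
    simp [pvARight, this]
  | succ f ih =>
    intro k hk
    have hklt : k < cs.length := by omega
    have hget : PySem.List.pyGet? cs ((k : Nat) : Int) = some cs[k] := by
      rw [PySem.List.pyGet?_natCast, List.getElem?_eq_getElem hklt]
    have hdrop : cs.drop k = cs[k] :: cs.drop (k + 1) := List.drop_eq_getElem_cons hklt
    by_cases hw : pvIsW cs[k] = true
    · have hh : pvH cs k = pvH cs (k + 1) + 1 := by
        unfold pvH
        rw [hdrop, List.takeWhile_cons, if_pos hw, List.length_cons]
      rw [pvARight]
      rw [if_pos ?hc]
      case hc => exact ⟨by exact_mod_cast hklt, by rw [hget, Option.any_some]; exact hw⟩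
      rw [show ((k : Nat) : Int) + 1 = (((k : Nat) + 1 : Nat) : Int) by push_cast; ring,
        ih (k + 1) (by omega), hh]
      push_cast; ring
    · have hh : pvH cs k = 0 := by
        unfold pvH
        rw [hdrop, List.takeWhile_cons, if_neg hw, List.length_nil]
      rw [pvARight, if_neg ?hc, hh]
      case hc =>
        intro hcond
        rw [hget, Option.any_some] at hcond
        exact hw hcond.2
      push_cast; ring

-- B's scan never finds a run once the cursor is strictly left of the scan position
lemma pvBGo_miss : ∀ (f : Nat) (cs : List Char) (i : Nat) (col : Int), cs.length ≤ f →
    col < (i : Int) → pvBGo f col cs i = "" := by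
  intro f
  induction f with
  | zero =>
    intro cs i col hf hcol
    match cs with
    | [] => rw [pvBGo]
    | c :: t => simp at hf
  | succ f ih =>
    intro cs i col hf hcol
    match cs with
    | [] => rw [pvBGo]
    | c :: t =>
      rw [pvBGo]
      by_cases hc : pvIsW c = false
      · rw [if_pos hc]
        exact ih t (i + 1) col (by simp only [List.length_cons] at hf; omega)
          (by push_cast; omega)
      · rw [if_neg hc, if_neg (by push_cast; omega)]
        have hw1 : 0 < (List.takeWhile pvIsW (c :: t)).length := by
          have : pvIsW c = true := by revert hc; cases pvIsW c <;> simp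
          simp [List.takeWhile_cons, this]
        exact ih _ (i + (List.takeWhile pvIsW (c :: t)).length) col
          (by simp only [List.length_drop, List.length_cons]
              simp only [List.length_cons] at hf
              omega)
          (by push_cast; omega)

-- the scan position is only compared against the cursor: both may be shifted together
lemma pvBGo_shift : ∀ (f : Nat) (cs : List Char) (i : Nat) (col : Int), cs.length ≤ f →
    (i : Int) ≤ col → pvBGo f col cs i = pvBGo f (col - i) cs 0 := by
  intro f
  induction f with
  | zero =>
    intro cs i col hf hcol
    match cs with
    | [] => rw [pvBGo, pvBGo]
    | c :: t => simp at hf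
  | succ f ih =>
    intro cs i col hf hcol
    match cs with
    | [] => rw [pvBGo, pvBGo]
    | c :: t =>
      have hf' : t.length ≤ f := by simp only [List.length_cons] at hf; omega
      rw [pvBGo, pvBGo]
      by_cases hc : pvIsW c = false
      · rw [if_pos hc, if_pos hc]
        by_cases hi : ((i : Int) + 1) ≤ col
        · rw [ih t (i + 1) col hf' (by push_cast; omega)]
          rw [ih t (0 + 1) (col - i) hf' (by push_cast; omega)]
          congr 1
          push_cast; ring
        · have hcoli : col = (i : Int) := by omega
          rw [pvBGo_miss f t (i + 1) col hf' (by push_cast; omega)]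
          rw [pvBGo_miss f t (0 + 1) (col - i) hf' (by push_cast; omega)]
      · rw [if_neg hc, if_neg hc]
        set w := List.takeWhile pvIsW (c :: t) with hwdef
        have hw1 : 0 < w.length := by
          have : pvIsW c = true := by revert hc; cases pvIsW c <;> simp
          simp [hwdef, List.takeWhile_cons, this]
        have hfd : (List.drop w.length (c :: t)).length ≤ f := by
          simp only [List.length_drop, List.length_cons]
          simp only [List.length_cons] at hf
          omega
        by_cases hin : col ≤ ((i + w.length : Nat) : Int)
        · rw [if_pos ⟨hcol, hin⟩, if_pos ⟨by push_cast; omega, by push_cast at hin ⊢; omega⟩]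
        · rw [if_neg (by push_cast at hin ⊢; intro h; omega),
            if_neg (by push_cast at hin ⊢; intro h; omega)]
          rw [ih _ (i + w.length) col hfd (by push_cast at hin ⊢; omega)]
          rw [ih _ (0 + w.length) (col - i) hfd (by push_cast at hin ⊢; omega)]
          congr 1
          push_cast; ring

lemma takeWhile_all {α : Type} (p : α → Bool) (l : List α) (h : ∀ x ∈ l, p x = true) :
    List.takeWhile p l = l := List.takeWhile_eq_self_iff.mpr h

-- main: B's run scan computes the word around k
lemma pvBGo_spec : ∀ (f : Nat) (cs : List Char) (k : Nat), cs.length ≤ f → k ≤ cs.length →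
    pvBGo f ((k : Nat) : Int) cs 0 = pvW cs k := by
  intro f
  induction f with
  | zero =>
    intro cs k hf hk
    match cs with
    | [] =>
      have : k = 0 := by simp at hk; omega
      subst this
      rw [pvBGo]; simp [pvW, pvT, pvH]; rfl
    | c :: t => simp at hf
  | succ f ih =>
    intro cs k hf hk
    match cs with
    | [] =>
      have : k = 0 := by simp at hk; omega
      subst this
      rw [pvBGo]; simp [pvW, pvT, pvH]; rfl
    | c :: t =>
      have hf' : t.length ≤ f := by simp only [List.length_cons] at hf; omega
      rw [pvBGo]
      by_cases hc : pvIsW c = false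
      · rw [if_pos hc]
        match k with
        | 0 =>
          simp only [Nat.cast_zero]
          rw [pvBGo_miss f t (0 + 1) 0 hf' (by norm_num)]
          simp [pvW, pvT, pvH, List.takeWhile_cons, hc]
          rfl
        | k + 1 =>
          rw [pvBGo_shift f t (0 + 1) ((k + 1 : Nat) : Int) hf' (by push_cast; omega)]
          have : ((k + 1 : Nat) : Int) - ((0 + 1 : Nat) : Int) = ((k : Nat) : Int) := by
            push_cast; ring
          rw [this, ih t k hf' (by simp only [List.length_cons] at hk; omega)]
          -- pvW (c :: t) (k+1) = pvW t k  when pvIsW c = false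
          have hT : pvT (c :: t) (k + 1) = pvT t k := by
            simp only [pvT, List.take_succ_cons, List.reverse_cons]
            rw [List.takeWhile_append]
            split_ifs with hfull
            · have hall : ∀ x ∈ (t.take k).reverse, pvIsW x = true :=
                List.takeWhile_eq_self_iff.mp
                  (List.IsPrefix.eq_of_length (List.takeWhile_prefix (p := pvIsW)) hfull)
              rw [takeWhile_all _ _ hall]
              simp [List.takeWhile_cons, hc]
            · rfl
          have hH : pvH (c :: t) (k + 1) = pvH t k := by simp [pvH]
          have hTle : pvT t k ≤ k := pvT_le t k
          simp only [pvW, hT, hH]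
          congr 2
          have : (k + 1) - pvT t k = (k - pvT t k) + 1 := by omega
          rw [this, List.drop_succ_cons]
      · -- word head: the maximal run w starts at position 0
        rw [if_neg hc]
        have hcw : pvIsW c = true := by revert hc; cases pvIsW c <;> simp
        set w := List.takeWhile pvIsW (c :: t) with hwdef
        set rest := List.dropWhile pvIsW (c :: t) with hrdef
        have hsplit : w ++ rest = c :: t := List.takeWhile_append_dropWhile
        have hwall : ∀ x ∈ w, pvIsW x = true := fun x hx => List.mem_takeWhile_imp hx
        have hw1 : 0 < w.length := by simp [hwdef, List.takeWhile_cons, hcw]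
        have hlen : w.length + rest.length = (c :: t).length := by
          rw [← List.length_append, hsplit]
        have hrest_head : ∀ (hr : rest ≠ []), pvIsW (rest.head hr) = false := by
          intro hr
          have := List.head_dropWhile_not (p := pvIsW) (l := c :: t) (by rw [← hrdef]; exact hr)
          simpa [← hrdef] using this
        by_cases hkm : k ≤ w.length
        · rw [if_pos ⟨by positivity, by push_cast; omega⟩]
          -- pvW cs k = String.mk w
          have htake : (c :: t).take k = w.take k := by
            conv_lhs => rw [← hsplit]
            exact List.take_append_of_le_length hkm
          have hT : pvT (c :: t) k = k := by
            simp only [pvT, htake]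
            rw [takeWhile_all _ _ (by
              intro x hx
              exact hwall x (List.mem_of_mem_take (by simpa using hx)))]
            simp only [List.length_reverse, List.length_take]
            omega
          have hdrop : (c :: t).drop k = w.drop k ++ rest := by
            conv_lhs => rw [← hsplit]
            exact List.drop_append_of_le_length hkm
          have hH : pvH (c :: t) k = w.length - k := by
            simp only [pvH, hdrop]
            rw [List.takeWhile_append]
            rw [if_pos (by rw [takeWhile_all _ _ (fun x hx => hwall x (List.mem_of_mem_drop hx))])]
            have hrw : List.takeWhile pvIsW rest = [] := by
              match h : rest with
              | [] => rfl
              | r :: rs =>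
                have := hrest_head (by simp [h])
                simp [h] at this
                simp [List.takeWhile_cons, this]
            rw [hrw]
            simp
          simp only [pvW, hT, hH]
          have h1 : k - k = 0 := by omega
          have h2 : k + (w.length - k) = w.length := by omega
          rw [h1, h2, List.drop_zero]
          have htw : List.take w.length (c :: t) = w := by
            conv_lhs => rw [← hsplit]
            rw [List.take_append_of_le_length (le_refl _), List.take_length]
          rw [htw]
        · -- k > |w| : skip the run, recurse on rest with cursor k - |w|
          rw [if_neg (by push_cast; omega)]
          have hdropw : List.drop w.length (c :: t) = rest := by
            conv_lhs => rw [← hsplit]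
            simp
          rw [hdropw]
          have hrlen : rest.length ≤ f := by
            simp only [List.length_cons] at hf hlen
            omega
          rw [pvBGo_shift f rest (0 + w.length) ((k : Nat) : Int) hrlen (by push_cast; omega)]
          have hcast : ((k : Nat) : Int) - ((0 + w.length : Nat) : Int) = ((k - w.length : Nat) : Int) := by
            push_cast; omega
          rw [hcast, ih rest (k - w.length) hrlen
            (by simp only [List.length_cons] at hk hlen; omega)]
          -- pvW (c :: t) k = pvW rest (k - |w|)
          set k' := k - w.length with hk'def
          have hk'1 : 1 ≤ k' := by omega
          have hk'r : k' ≤ rest.length := by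
            simp only [List.length_cons] at hk hlen
            omega
          have hrne : rest ≠ [] := by
            intro h; rw [h] at hk'r; simp at hk'r; omega
          have htake : (c :: t).take k = w ++ rest.take k' := by
            conv_lhs => rw [← hsplit]
            rw [List.take_append, List.take_of_length_le (by omega)]
          have hT : pvT (c :: t) k = pvT rest k' := by
            simp only [pvT, htake, List.reverse_append]
            rw [List.takeWhile_append]
            split_ifs with hfull
            · exfalso
              -- (rest.take k').reverse would be all word chars, but rest.head is not
              have hall := List.takeWhile_eq_self_iff.mp
                (List.IsPrefix.eq_of_length (List.takeWhile_prefix (p := pvIsW)) hfull)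
              have hmem : rest.head hrne ∈ (rest.take k').reverse := by
                rw [List.mem_reverse]
                have h0 : 0 < (rest.take k').length := by
                  simp only [List.length_take]
                  omega
                have hin := List.getElem_mem h0
                rwa [List.getElem_take, ← List.head_eq_getElem hrne] at hin
              have := hall _ hmem
              rw [hrest_head hrne] at this
              exact absurd this (by simp)
            · rfl
          have hdrop : (c :: t).drop k = rest.drop k' := by
            conv_lhs => rw [← hsplit]
            rw [List.drop_append, List.drop_eq_nil_of_le (by omega), List.nil_append]
          have hH : pvH (c :: t) k = pvH rest k' := by simp [pvH, hdrop]
          have hTle : pvT rest k' ≤ k' := pvT_le rest k'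
          simp only [pvW, hT, hH]
          rw [show k - pvT rest k' = w.length + (k' - pvT rest k') from by omega]
          have hfin : List.drop (w.length + (k' - pvT rest k')) (c :: t) = List.drop (k' - pvT rest k') rest := by
            rw [← hsplit, List.drop_append, List.drop_eq_nil_of_le (by omega), List.nil_append]
            congr 1
            omega
          rw [hfin]

-- A's expand-around-cursor result equals B's run scan, over the shared char list
lemma pvA_eq_pvB (cs : List Char) (col : Int) (h : 0 ≤ col) :
    String.mk (PySem.List.slice cs
      (some (pvALeft cs (if col > (cs.length : Int) then (cs.length : Int) else col).toNat
        (if col > (cs.length : Int) then (cs.length : Int) else col)))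
      (some (pvARight cs (cs.length : Int)
        ((cs.length : Int) - (if col > (cs.length : Int) then (cs.length : Int) else col)).toNat
        (if col > (cs.length : Int) then (cs.length : Int) else col))))
    = pvBGo cs.length (min col (cs.length : Int)) cs 0 := by
  set col1 : Int := if col > (cs.length : Int) then (cs.length : Int) else col with hcol1
  have h0 : 0 ≤ col1 ∧ col1 ≤ (cs.length : Int) := by
    rw [hcol1]; split_ifs <;> omega
  have hmin : min col (cs.length : Int) = col1 := by
    rw [hcol1]; split_ifs <;> omega
  have hkcast : ((col1.toNat : Nat) : Int) = col1 := by omega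
  set k : Nat := col1.toNat with hkdef
  have hkle : k ≤ cs.length := by omega
  rw [hmin, ← hkcast]
  rw [show ((cs.length : Int) - ((k : Nat) : Int)).toNat = cs.length - k from by omega]
  rw [pvALeft_spec cs k hkle, pvARight_spec cs (cs.length - k) k (by omega),
    pvBGo_spec cs.length cs k (le_refl _) hkle]
  rw [PySem.List.slice_natCast]
  rw [show (k + pvH cs k) - (k - pvT cs k) = pvT cs k + pvH cs k from by
    have := pvT_le cs k; omega]
  rfl

-- ===== VERDICT (by name: the statement is the Claim_ definition above) =====
theorem word_at_py_spec : Claim_equal_word_at_py := by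
  intro line col _hdom hpre
  unfold Spec_word_at_py word_at_py word_at_py_alt
  exact pvA_eq_pvB line.toList col hpre

@[simp] theorem word_at_py_raises : Claim_raises_word_at_py := by
  unfold Claim_raises_word_at_py
  constructor
  · intro line col _hdom hr hpre
    have h1 : (0 : Int) ≤ (line.toList.length : Int) := by positivity
    have : col < 0 := by unfold Raises_word_at_py at hr; omega
    exact absurd hpre (by unfold Pre_word_at_py; omega)
  · exact ⟨by decide, by decide, by decide⟩
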